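-- pv_equiv track=rewrite | github.com/ainskeep/AdventOfCode2019 | 04/DayFour.py | neverDecreasesAndHasDouble
-- ===== SOURCE A (Python) =====
-- def neverDecreasesAndHasDouble(x):
--     intList = [int(d) for d in str(x)]
--     lastDigit = -1
--     hasDouble = False
--     for digit in intList:
--         if digit == lastDigit:
--             hasDouble = True
--
--         if digit >= lastDigit:
--             lastDigit = digit
--         else:
--             return False
--
--     # if we make it this far, never decreases is true
--     return hasDouble
-- ===== SOURCE B (Python) =====
-- def neverDecreasesAndHasDouble(x):
--     digits = [int(d) for d in str(x)]
--     pairs = list(zip(digits, digits[1:]))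
--     return all(a <= b for a, b in pairs) and any(a == b for a, b in pairs)
-- ===== Notes on version B (the rewrite author's own statement) =====
-- stated objective: simpler
-- what changed: A's single stateful pass (tracking lastDigit with an early return and a hasDouble flag) is replaced by two independent pairwise scans over adjacent digit pairs: all(a <= b) and any(a == b).
import Mathlib
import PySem

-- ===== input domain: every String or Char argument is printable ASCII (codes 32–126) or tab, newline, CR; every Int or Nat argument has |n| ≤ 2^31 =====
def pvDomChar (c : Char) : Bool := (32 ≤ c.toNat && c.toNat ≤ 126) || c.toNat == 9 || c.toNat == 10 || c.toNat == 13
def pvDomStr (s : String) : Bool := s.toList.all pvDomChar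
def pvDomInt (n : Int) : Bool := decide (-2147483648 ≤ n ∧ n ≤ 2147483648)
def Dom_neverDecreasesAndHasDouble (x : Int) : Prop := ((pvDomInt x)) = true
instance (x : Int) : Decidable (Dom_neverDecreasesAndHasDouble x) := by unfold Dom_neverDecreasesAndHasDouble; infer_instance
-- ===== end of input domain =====

-- B replaces A's single stateful pass (lastDigit + early return) with two independent
-- pairwise scans over adjacent digit pairs (all non-decreasing, any equal): simpler.


-- ===== PORT A =====
-- int(d) for a single character d of str(x): under Pre_ (0 ≤ x) every character of
-- str(x) is a decimal digit, where int(d) = code(d) - 48 exactly.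
def pvDigits (x : Int) : List Int :=
  (PySem.Int.toChars x).map (fun c => (c.toNat : Int) - 48)

-- the for-loop of A, with its state (lastDigit, hasDouble) and early return False
def nvLoop : List Int → Int → Bool → Bool
  | [], _, hasDouble => hasDouble
  | digit :: rest, lastDigit, hasDouble =>
    let hasDouble := if digit == lastDigit then true else hasDouble
    if digit ≥ lastDigit then nvLoop rest digit hasDouble else false

def neverDecreasesAndHasDouble (x : Int) : Bool :=
  nvLoop (pvDigits x) (-1) false

-- ===== PORT B =====
def neverDecreasesAndHasDouble_alt (x : Int) : Bool :=
  -- pairs = zip(digits, digits[1:]); all(a <= b) and any(a == b)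
  (((pvDigits x).zip (pvDigits x).tail).all fun p => p.1 ≤ p.2) &&
    (((pvDigits x).zip (pvDigits x).tail).any fun p => p.1 == p.2)

-- ===== PRECONDITION & SPEC =====
-- Pre_: 0 ≤ x; on negative x both Pythons raise ValueError (int('-') in the comprehension).
def Pre_neverDecreasesAndHasDouble (x : Int) : Prop := 0 ≤ x
instance (x : Int) : Decidable (Pre_neverDecreasesAndHasDouble x) := by unfold Pre_neverDecreasesAndHasDouble; infer_instance
def pvWitness_neverDecreasesAndHasDouble : Int := 111223

def Spec_neverDecreasesAndHasDouble (x : Int) (out : Bool) : Prop := out = neverDecreasesAndHasDouble_alt x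
instance (x : Int) (out : Bool) : Decidable (Spec_neverDecreasesAndHasDouble x out) := by unfold Spec_neverDecreasesAndHasDouble; infer_instance

-- ===== CLAIM (what is proved, stated in full; the proofs are below) =====
def Claim_equal_neverDecreasesAndHasDouble : Prop := ∀ (x : Int), Dom_neverDecreasesAndHasDouble x → Pre_neverDecreasesAndHasDouble x → Spec_neverDecreasesAndHasDouble x (neverDecreasesAndHasDouble x)

-- ===== LEMMAS AND PROOFS =====

-- A's loop, from any start state, computes "chain last::ds non-decreasing" && "hd or some adjacent pair equal".
theorem nvLoop_eq (ds : List Int) : ∀ (last : Int) (hd : Bool),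
    nvLoop ds last hd =
      ((((last :: ds).zip ds).all fun p => p.1 ≤ p.2) &&
        (hd || ((last :: ds).zip ds).any fun p => p.1 == p.2)) := by
  induction ds with
  | nil => intro last hd; cases hd <;> simp [nvLoop]
  | cons d rest ih =>
    intro last hd
    by_cases hle : last ≤ d
    · have hge : (d ≥ last) = True := by simp [hle]
      simp only [nvLoop, hge, if_true, ih, List.zip_cons_cons, List.all_cons, List.any_cons]
      by_cases heq : d = last
      · subst heq; simp
      · have h1 : (d == last) = false := by simp [heq]
        have h2 : (last == d) = false := by simp; omega
        simp [h1, h2]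
    · have hge : (d ≥ last) = False := by simp [hle]
      simp only [nvLoop, hge, if_false, List.zip_cons_cons, List.all_cons]
      simp [hle]

-- every character Nat.toDigitsCore 10 produces is in the accumulator or digitChar of some m < 10
theorem toDigitsCore_chars : ∀ (fuel n : Nat) (ds : List Char) (c : Char),
    c ∈ Nat.toDigitsCore 10 fuel n ds → c ∈ ds ∨ ∃ m, m < 10 ∧ c = Nat.digitChar m := by
  intro fuel
  induction fuel with
  | zero => intro n ds c hc; exact Or.inl hc
  | succ fuel ih =>
    intro n ds c hc
    simp only [Nat.toDigitsCore] at hc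
    have hm : n % 10 < 10 := Nat.mod_lt _ (by norm_num)
    split at hc
    · rcases List.mem_cons.mp hc with h | h
      · exact Or.inr ⟨n % 10, hm, h⟩
      · exact Or.inl h
    · rcases ih (n / 10) (Nat.digitChar (n % 10) :: ds) c hc with h | h
      · rcases List.mem_cons.mp h with h' | h'
        · exact Or.inr ⟨n % 10, hm, h'⟩
        · exact Or.inl h'
      · exact Or.inr h

theorem digitChar_ge (m : Nat) (hm : m < 10) : 48 ≤ (Nat.digitChar m).toNat := by
  interval_cases m <;> decide

-- under Pre_, every entry of pvDigits x is ≥ 0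
theorem pvDigits_nonneg (x : Int) (d : Int) (hd : d ∈ pvDigits x) (hx : 0 ≤ x) : 0 ≤ d := by
  simp only [pvDigits, List.mem_map] at hd
  obtain ⟨c, hc, rfl⟩ := hd
  have hc' : c ∈ Nat.toDigits 10 x.toNat := by
    simpa [PySem.Int.toChars, Int.not_lt.mpr hx] using hc
  rcases toDigitsCore_chars _ _ _ _ hc' with h | ⟨m, hm, rfl⟩
  · simp at h
  · have := digitChar_ge m hm
    omega

-- ===== VERDICT (by name: the statement is the Claim_ definition above) =====
theorem neverDecreasesAndHasDouble_spec : Claim_equal_neverDecreasesAndHasDouble := by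
  intro x _ hx
  unfold Spec_neverDecreasesAndHasDouble neverDecreasesAndHasDouble neverDecreasesAndHasDouble_alt
  rw [nvLoop_eq]
  cases hds : pvDigits x with
  | nil => simp
  | cons d rest =>
    have hdnn : 0 ≤ d := pvDigits_nonneg x d (by rw [hds]; exact List.mem_cons_self) hx
    have h1 : (decide ((-1 : Int) ≤ d)) = true := by simp; omega
    have h2 : ((-1 : Int) == d) = false := by simp; omega
    simp [h1, h2, List.tail]
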